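-- pv_equiv track=rewrite | github.com/frshdjfry/NLP-in-Dramatic-Literature | Beckett/motive.py | prepare_gantt_data
-- ===== SOURCE A (Python) =====
-- from collections import defaultdict
--
-- def longest_repeated_substrings(text, max_length=260):
--     """Find the longest repeated substrings in the text."""
--     n = len(text)
--     suffixes = sorted([text[i:] for i in range(n)])
--     lcp = [0] * n  # Longest common prefix array
--
--     def lcp_length(s1, s2):
--         length = 0
--         while length < len(s1) and length < len(s2) and s1[length] == s2[length]:
--             length += 1
--         return length
--
--     for i in range(1, n):
--         lcp[i] = lcp_length(suffixes[i - 1], suffixes[i])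
--
--     substrings = defaultdict(list)
--     for i in range(1, n):
--         if lcp[i] > 0:
--             substring = suffixes[i][:lcp[i]]
--             substrings[substring].append(i - lcp[i])
--
--     filtered_substrings = [sub for sub in substrings if len(sub) <= max_length]
--     filtered_substrings.sort(key=len, reverse=True)
--
--     return filtered_substrings[:10]
--
-- def find_substring_positions(text, substring):
--     """Find all positions of a substring in the text."""
--     positions = []
--     pos = text.find(substring)
--     while pos != -1:
--         positions.append(pos)
--         pos = text.find(substring, pos + 1)
--     return positions
--
-- def filter_subsequences(subsequences):
--     """Filter out subsequences that are contained within longer subsequences."""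
--     filtered = []
--     for sub in subsequences:
--         if not any(sub in longer_sub for longer_sub in filtered):
--             filtered.append(sub)
--     return filtered
--
-- def prepare_gantt_data(text):
--     """Prepare Gantt chart data by finding longest repeated substrings and their positions."""
--     substrings = longest_repeated_substrings(text)
--     filtered_substrings = filter_subsequences(substrings)
--     data = []
--     for substring in filtered_substrings:
--         positions = find_substring_positions(text, substring)
--         for pos in positions:
--             data.append((substring, pos, pos + len(substring)))
--     return data, filtered_substrings
-- ===== SOURCE B (Python) =====
-- def _insert_sorted(lst, x):
--     """Insert x into the sorted list lst, keeping it sorted (before the first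
--     strictly greater element)."""
--     i = 0
--     while i < len(lst) and lst[i] <= x:
--         i += 1
--     lst.insert(i, x)
--
--
-- def _common_prefix(a, b):
--     """Longest common prefix of two strings, built character by character."""
--     out = []
--     for x, y in zip(a, b):
--         if x != y:
--             break
--         out.append(x)
--     return ''.join(out)
--
--
-- def prepare_gantt_data(text):
--     """Prepare Gantt chart data by finding longest repeated substrings and their positions."""
--     n = len(text)
--     # sorted suffix list, built incrementally by ordered insertion
--     suffixes = []
--     for i in range(n):
--         _insert_sorted(suffixes, text[i:])
--     # one fused pass over adjacent pairs: common prefix + ordered dedup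
--     seen = set()
--     candidates = []
--     for prev, cur in zip(suffixes, suffixes[1:]):
--         sub = _common_prefix(prev, cur)
--         if sub and sub not in seen:
--             seen.add(sub)
--             candidates.append(sub)
--     top = sorted([s for s in candidates if len(s) <= 260], key=len, reverse=True)[:10]
--     filtered = []
--     for s in top:
--         if not any(s in t for t in filtered):
--             filtered.append(s)
--     data = [(s, p, p + len(s))
--             for s in filtered
--             for p in range(n) if text.startswith(s, p)]
--     return data, filtered
-- ===== Notes on version B (the rewrite author's own statement) =====
-- stated objective: alternative
-- what changed: B builds the sorted suffix list by incremental ordered insertion instead of materialising all suffixes and calling sorted(), fuses A's three passes (LCP array, defaultdict insertion, key filter) into one adjacent-pair pass computing the common prefix character-wise with a seen-set dedup, replaces the text.find() while-loop by a position-scan comprehension over range(n), and assembles the data with a comprehension instead of nested append loops.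
import Mathlib
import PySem

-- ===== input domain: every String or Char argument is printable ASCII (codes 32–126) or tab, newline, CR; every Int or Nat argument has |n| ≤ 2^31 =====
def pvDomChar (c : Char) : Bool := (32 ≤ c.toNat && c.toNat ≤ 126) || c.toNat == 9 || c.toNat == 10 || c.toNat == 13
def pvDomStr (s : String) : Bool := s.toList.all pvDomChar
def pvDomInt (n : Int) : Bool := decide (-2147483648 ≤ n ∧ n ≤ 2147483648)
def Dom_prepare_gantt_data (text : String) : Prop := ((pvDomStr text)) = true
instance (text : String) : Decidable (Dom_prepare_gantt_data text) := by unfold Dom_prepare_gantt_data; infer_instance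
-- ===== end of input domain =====

-- B replaces A's sort-all-suffixes + three separate LCP/dict/filter passes by an incremental
-- ordered insertion of the suffixes plus one fused adjacent-pair pass (character-wise common
-- prefix, seen-set dedup), and replaces the find() loop by a position-scan comprehension:
-- a genuinely different decomposition of the same exact computation (objective: alternative).
-- Both ports represent Python str values as List Char (PySem.Chars) internally, exactly as
-- the PySem prelude prescribes, and wrap String.ofList only on the returned values.

-- ===== PORT A =====

-- the while loop of lcp_length, scanning both strings in step and counting
def pvLcpLen : List Char → List Char → Int
  | a :: as, b :: bs => if a = b then pvLcpLen as bs + 1 else 0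
  | _, _ => 0

-- the 'while pos != -1' find loop of find_substring_positions; the fuel argument is only a
-- termination guard (text.length+1 iterations always suffice: found positions strictly increase)
def pvGoFind (cs sub : List Char) : Int → List Int → Nat → List Int
  | _, acc, 0 => acc
  | pos, acc, fuel+1 =>
      if pos ≠ -1 then
        pvGoFind cs sub (PySem.Chars.findFrom cs sub (pos + 1) none) (acc ++ [pos]) fuel
      else acc

def find_substring_positions (cs sub : List Char) : List Int :=
  pvGoFind cs sub (PySem.Chars.find cs sub) [] (cs.length + 1)

def longest_repeated_substrings (cs : List Char) : List (List Char) :=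
  let n : Int := PySem.Chars.len cs
  let suffixes := PySem.List.sorted ((PySem.List.pyRange 0 n 1).map
      (fun i => PySem.List.slice cs (some i) none)) (fun s => s) false
  let lcp : List Int := PySem.List.pyRepeat [0] n
  let lcp := (PySem.List.pyRange 1 n 1).foldl
      (fun arr i => PySem.List.pySetD arr i
        (pvLcpLen (PySem.List.pyGetD suffixes (i - 1) [])
                  (PySem.List.pyGetD suffixes i []))) lcp
  let substrings := (PySem.List.pyRange 1 n 1).foldl
      (fun (d : PySem.Dict (List Char) (List Int)) i =>
        if PySem.List.pyGetD lcp i 0 > 0 then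
          d.modify (PySem.List.slice (PySem.List.pyGetD suffixes i []) none
              (some (PySem.List.pyGetD lcp i 0))) []
            (fun v => v ++ [i - PySem.List.pyGetD lcp i 0])
        else d) PySem.Dict.empty
  let filtered := substrings.keys.filter (fun sub => PySem.Chars.len sub ≤ 260)
  let filtered := PySem.List.sorted filtered (fun s => PySem.Chars.len s) true
  PySem.List.slice filtered none (some 10)

def filter_subsequences (subsequences : List (List Char)) : List (List Char) :=
  subsequences.foldl (fun filtered sub =>
    if filtered.any (fun longer_sub => PySem.Chars.isIn sub longer_sub) then filtered
    else filtered ++ [sub]) []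

def prepare_gantt_data (text : String) : (List (String × Int × Int)) × List String :=
  let cs := text.toList
  let substrings := longest_repeated_substrings cs
  let filtered_substrings := filter_subsequences substrings
  let data := filtered_substrings.foldl (fun data substring =>
    (find_substring_positions cs substring).foldl
      (fun data pos =>
        data ++ [(String.ofList substring, pos, pos + PySem.Chars.len substring)]) data) []
  (data, filtered_substrings.map String.ofList)

-- ===== PORT B =====

-- _insert_sorted: scan past the ≤ elements, insert before the first greater one
def pvInsertSorted (x : List Char) : List (List Char) → List (List Char)
  | [] => [x]
  | y :: ys => if y ≤ x then y :: pvInsertSorted x ys else x :: y :: ys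

-- _common_prefix: walk the zipped characters, stop at the first mismatch
def pvCommonPrefix : List Char → List Char → List Char
  | x :: xs, y :: ys => if x ≠ y then [] else x :: pvCommonPrefix xs ys
  | _, _ => []

def prepare_gantt_data_alt (text : String) : (List (String × Int × Int)) × List String :=
  let cs := text.toList
  let n : Int := PySem.Chars.len cs
  let suffixes := (PySem.List.pyRange 0 n 1).foldl
      (fun lst i => pvInsertSorted (PySem.List.slice cs (some i) none) lst) []
  let sc := (suffixes.zip (PySem.List.slice suffixes (some 1) none)).foldl
      (fun (p : PySem.Set (List Char) × List (List Char)) pr =>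
        let sub := pvCommonPrefix pr.1 pr.2
        if sub ≠ [] ∧ sub ∉ p.1 then (PySem.Set.add p.1 sub, p.2 ++ [sub]) else p)
      (PySem.Set.empty, [])
  let top := (PySem.List.sorted (sc.2.filter (fun s => PySem.Chars.len s ≤ 260))
      (fun s => PySem.Chars.len s) true).take 10
  let filtered := top.foldl (fun acc s =>
      if acc.any (fun t => PySem.Chars.isIn s t) then acc else acc ++ [s]) []
  let data := filtered.flatMap (fun s =>
      ((PySem.List.pyRange 0 n 1).filter
        -- text.startswith(s, p): exact for the 0 ≤ p < n drawn from range(n)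
        (fun p => PySem.Chars.startswith (cs.drop p.toNat) s)).map
        (fun p => (String.ofList s, p, p + PySem.Chars.len s)))
  (data, filtered.map String.ofList)

-- ===== PRECONDITION & SPEC =====
def Spec_prepare_gantt_data (text : String) (out : (List (String × Int × Int)) × List String) : Prop := out = prepare_gantt_data_alt text
instance (text : String) (out : (List (String × Int × Int)) × List String) : Decidable (Spec_prepare_gantt_data text out) := by unfold Spec_prepare_gantt_data; infer_instance

-- ===== CLAIM (what is proved, stated in full; the proofs are below) =====
def Claim_equal_prepare_gantt_data : Prop := ∀ (text : String), Dom_prepare_gantt_data text → Spec_prepare_gantt_data text (prepare_gantt_data text)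

-- ===== LEMMAS AND PROOFS =====

-- ---- stage 1: B's incremental ordered insertion builds exactly sorted(suffixes) ----

theorem pv_mem_insertSorted (x y : List Char) (l : List (List Char)) :
    y ∈ pvInsertSorted x l ↔ y = x ∨ y ∈ l := by
  induction l with
  | nil => simp [pvInsertSorted]
  | cons a t ih =>
    simp only [pvInsertSorted]
    split <;> simp [ih] <;> tauto

theorem pv_perm_insertSorted (x : List Char) (l : List (List Char)) :
    (pvInsertSorted x l).Perm (x :: l) := by
  induction l with
  | nil => simp [pvInsertSorted]
  | cons a t ih =>
    simp only [pvInsertSorted]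
    split
    · exact ((ih.cons a).trans (List.Perm.swap x a t)).symm.symm
    · exact List.Perm.refl _

theorem pv_pairwise_insertSorted (x : List Char) (l : List (List Char))
    (hl : l.Pairwise (· < ·)) (hx : x ∉ l) : (pvInsertSorted x l).Pairwise (· < ·) := by
  induction l with
  | nil => simp [pvInsertSorted]
  | cons a t ih =>
    rw [List.pairwise_cons] at hl
    simp only [List.mem_cons, not_or] at hx
    simp only [pvInsertSorted]
    split
    · rename_i hax
      have hax' : a < x := lt_of_le_of_ne hax (fun h => hx.1 h.symm)
      rw [List.pairwise_cons]
      refine ⟨?_, ih hl.2 hx.2⟩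
      intro y hy
      rcases (pv_mem_insertSorted x y t).mp hy with h | h
      · exact h ▸ hax'
      · exact hl.1 y h
    · rename_i hax
      have : x < a := by
        by_contra hxa
        exact hax (le_of_not_gt (by simpa using hxa))
      rw [List.pairwise_cons]
      refine ⟨?_, List.pairwise_cons.mpr hl⟩
      intro y hy
      rcases List.mem_cons.mp hy with h | h
      · exact h ▸ this
      · exact lt_trans this (hl.1 y h)

theorem pv_foldl_insert_perm {α : Type} (l : List α) (g : α → List Char) (acc : List (List Char)) :
    (l.foldl (fun a i => pvInsertSorted (g i) a) acc).Perm (acc ++ l.map g) := by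
  induction l generalizing acc with
  | nil => simp
  | cons x t ih =>
    simp only [List.foldl_cons, List.map_cons]
    refine (ih (pvInsertSorted (g x) acc)).trans ?_
    refine (List.Perm.append_right (t.map g) (pv_perm_insertSorted (g x) acc)).trans ?_
    exact List.perm_middle.symm

theorem pv_foldl_insert_pairwise {α : Type} (l : List α) (g : α → List Char) (acc : List (List Char))
    (hl : (l.map g).Pairwise (· ≠ ·)) (hacc : acc.Pairwise (· < ·)) (hd : ∀ x ∈ l, g x ∉ acc) :
    (l.foldl (fun a i => pvInsertSorted (g i) a) acc).Pairwise (· < ·) := by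
  induction l generalizing acc with
  | nil => simpa
  | cons x t ih =>
    rw [List.map_cons, List.pairwise_cons] at hl
    simp only [List.foldl_cons]
    refine ih (pvInsertSorted (g x) acc) hl.2
      (pv_pairwise_insertSorted (g x) acc hacc (hd x (by simp))) ?_
    intro y hy hmem
    rcases (pv_mem_insertSorted (g x) (g y) acc).mp hmem with h | h
    · exact (hl.1 (g y) (List.mem_map_of_mem hy)) h.symm
    · exact hd y (by simp [hy]) h

theorem pv_suffixes_pairwise_ne (cs : List Char) :
    (((PySem.List.pyRange 0 (cs.length : Int) 1)).map
      (fun i => PySem.List.slice cs (some i) none)).Pairwise (· ≠ ·) := by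
  rw [List.pairwise_iff_getElem]
  intro i j hi hj hij
  simp only [List.length_map, PySem.List.length_pyRange_one] at hi hj
  have hn : ((cs.length : Int) - 0).toNat = cs.length := by omega
  rw [hn] at hi hj
  simp only [List.getElem_map, PySem.List.getElem_pyRange_one]
  have e1 : (0 : Int) + (i : Int) = ((i : Nat) : Int) := by omega
  have e2 : (0 : Int) + (j : Int) = ((j : Nat) : Int) := by omega
  rw [e1, e2, PySem.List.slice_from_natCast, PySem.List.slice_from_natCast]
  intro h
  have := congrArg List.length h
  simp only [List.length_drop] at this
  omega

theorem pv_sorted_inst {κ : Type} (xs : List (List Char)) (key : List Char → κ)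
    [i1 : LT κ] [i2 : DecidableLT κ] [i3 : DecidableLT κ] (r : Bool) :
    @PySem.List.sorted _ _ i1 i2 xs key r = @PySem.List.sorted _ _ i1 i3 xs key r := by
  congr 1

theorem pv_build_eq_sorted (cs : List Char) :
    ((PySem.List.pyRange 0 (cs.length : Int) 1).foldl
      (fun lst i => pvInsertSorted (PySem.List.slice cs (some i) none) lst) [])
    = PySem.List.sorted ((PySem.List.pyRange 0 (cs.length : Int) 1).map
        (fun i => PySem.List.slice cs (some i) none)) (fun s => s) false := by
  have hperm := pv_foldl_insert_perm (PySem.List.pyRange 0 (cs.length : Int) 1)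
      (fun i => PySem.List.slice cs (some i) none) []
  have hpw := pv_foldl_insert_pairwise (PySem.List.pyRange 0 (cs.length : Int) 1)
      (fun i => PySem.List.slice cs (some i) none) []
      (pv_suffixes_pairwise_ne cs) (by simp) (by simp)
  have := PySem.List.sorted_eq_of_perm_of_pairwise_lt
      ((PySem.List.pyRange 0 (cs.length : Int) 1).map (fun i => PySem.List.slice cs (some i) none))
      _ (fun s => s) (by simpa using hperm) hpw
  have e := @pv_sorted_inst (List Char)
      ((PySem.List.pyRange 0 (cs.length : Int) 1).map (fun i => PySem.List.slice cs (some i) none))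
      (fun s => s) List.instLT (fun a b => List.decidableLT a b) LinearOrder.toDecidableLT false
  rw [e]
  exact this.symm

-- ---- stage 2: indexed adjacent pairs = zip with tail ----

theorem pv_map_idx_eq_zip_tail {β : Type} (t : List (List Char)) (h : List Char → List Char → β) :
    (PySem.List.pyRange 1 (t.length : Int) 1).map
        (fun i => h (PySem.List.pyGetD t (i - 1) []) (PySem.List.pyGetD t i []))
      = (t.zip t.tail).map (fun pr => h pr.1 pr.2) := by
  apply List.ext_getElem
  · simp only [List.length_map, PySem.List.length_pyRange_one, List.length_zip, List.length_tail]
    omega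
  · intro k hk1 hk2
    simp only [List.length_map, PySem.List.length_pyRange_one] at hk1
    have hkt : k + 1 < t.length := by omega
    simp only [List.getElem_map, PySem.List.getElem_pyRange_one, List.getElem_zip]
    have e1 : (1 : Int) + (k : Int) - 1 = ((k : Nat) : Int) := by omega
    have e2 : (1 : Int) + (k : Int) = (((k + 1 : Nat)) : Int) := by omega
    rw [e1, e2, PySem.List.pyGetD_natCast, PySem.List.pyGetD_natCast,
        List.getD_eq_getElem _ _ (by omega), List.getD_eq_getElem _ _ hkt,
        List.getElem_tail]

-- ---- stage 3: the lcp array fold, read back pointwise ----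

theorem pv_foldl_pySetD_length (g : Int → Int) (l : List Int) (arr : List Int) :
    (l.foldl (fun a i => PySem.List.pySetD a i (g i)) arr).length = arr.length := by
  induction l generalizing arr with
  | nil => rfl
  | cons y ys ihl =>
    simp only [List.foldl_cons]
    rw [ihl]
    simp [PySem.List.length_pySetD]

theorem pv_foldl_pySetD_getD (g : Int → Int) (m : Nat) (arr : List Int)
    (hm : m ≤ arr.length) (j : Int) (h1 : 1 ≤ j) (hj : j < m) :
    PySem.List.pyGetD ((PySem.List.pyRange 1 (m : Int) 1).foldl
      (fun a i => PySem.List.pySetD a i (g i)) arr) j 0 = g j := by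
  induction m generalizing arr with
  | zero => omega
  | succ m ih =>
    by_cases hm : 1 ≤ m
    · have hrw : PySem.List.pyRange 1 ((m + 1 : Nat) : Int) 1
          = PySem.List.pyRange 1 (m : Int) 1 ++ [(m : Int)] := by
        have : ((m + 1 : Nat) : Int) = (m : Int) + 1 := by omega
        rw [this, PySem.List.pyRange_one_succ_right (by omega)]
      rw [hrw, List.foldl_append, List.foldl_cons, List.foldl_nil]
      obtain ⟨jn, rfl⟩ : ∃ jn : Nat, j = (jn : Int) := ⟨j.toNat, by omega⟩
      have hbl := pv_foldl_pySetD_length g (PySem.List.pyRange 1 (m : Int) 1) arr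
      rw [PySem.List.pyGetD_pySetD_natCast _ m jn _ _ (by rw [hbl]; omega)]
      split
      · rename_i hjm; rw [hjm]
      · exact ih arr (by omega) (by rename_i hne; omega)
    · have hm0 : m = 0 := by omega
      subst hm0
      omega

-- ---- stage 4: common prefix vs lcp length ----

theorem pv_lcpLen_nonneg (a b : List Char) : 0 ≤ pvLcpLen a b := by
  induction a generalizing b with
  | nil => cases b <;> simp [pvLcpLen]
  | cons x xs ih =>
    cases b with
    | nil => simp [pvLcpLen]
    | cons y ys =>
      simp only [pvLcpLen]
      split
      · have := ih ys; omega
      · simp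

theorem pv_commonPrefix_eq_take (a b : List Char) :
    pvCommonPrefix a b = b.take (pvLcpLen a b).toNat := by
  induction a generalizing b with
  | nil => cases b <;> simp [pvCommonPrefix, pvLcpLen]
  | cons x xs ih =>
    cases b with
    | nil => simp [pvCommonPrefix, pvLcpLen]
    | cons y ys =>
      simp only [pvCommonPrefix, pvLcpLen]
      by_cases hxy : x = y
      · subst hxy
        rw [if_neg (show ¬ x ≠ x from fun h => h rfl), if_pos rfl]
        have h1 : (pvLcpLen xs ys + 1).toNat = (pvLcpLen xs ys).toNat + 1 := by
          have := pv_lcpLen_nonneg xs ys; omega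
        rw [h1, List.take_succ_cons, ih ys]
      · rw [if_pos hxy, if_neg hxy]
        simp

theorem pv_commonPrefix_ne_nil (a b : List Char) :
    pvCommonPrefix a b ≠ [] ↔ 0 < pvLcpLen a b := by
  cases a with
  | nil => cases b <;> simp [pvCommonPrefix, pvLcpLen]
  | cons x xs =>
    cases b with
    | nil => simp [pvCommonPrefix, pvLcpLen]
    | cons y ys =>
      simp only [pvCommonPrefix, pvLcpLen]
      by_cases hxy : x = y
      · subst hxy
        rw [if_neg (show ¬ x ≠ x from fun h => h rfl), if_pos rfl]
        have := pv_lcpLen_nonneg xs ys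
        constructor
        · intro _; omega
        · intro _; simp
      · rw [if_pos hxy, if_neg hxy]
        simp

-- ---- stage 5: B's fused seen-set/candidate pass is an ordered-dedup (Set.update) ----

theorem pv_fused_dedup {α : Type} (l : List α) (F : α → List Char) (c : List (List Char)) :
    (l.foldl (fun (p : PySem.Set (List Char) × List (List Char)) x =>
        if F x ≠ [] ∧ F x ∉ p.1 then (PySem.Set.add p.1 (F x), p.2 ++ [F x]) else p) (c, c))
      = (PySem.Set.update c ((l.map F).filter (· ≠ [])),
         PySem.Set.update c ((l.map F).filter (· ≠ []))) := by
  induction l generalizing c with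
  | nil => simp [PySem.Set.update]
  | cons x t ih =>
    simp only [List.foldl_cons, List.map_cons, List.filter_cons]
    by_cases hx : F x = []
    · rw [if_neg (by simp [hx]), if_neg (by simp [hx])]
      exact ih c
    · have hd : decide (F x ≠ []) = true := by simpa using hx
      have hupd : PySem.Set.update c (F x :: List.filter (fun x => decide (x ≠ [])) (t.map F))
          = PySem.Set.update (PySem.Set.add c (F x)) (List.filter (fun x => decide (x ≠ [])) (t.map F)) := rfl
      by_cases hmem : F x ∈ c
      · rw [if_neg (fun h : F x ≠ [] ∧ F x ∉ c => h.2 hmem), if_pos hd, hupd,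
            show PySem.Set.add c (F x) = c by simp [PySem.Set.add, hmem]]
        exact ih c
      · rw [if_pos (⟨hx, hmem⟩ : F x ≠ [] ∧ F x ∉ c), if_pos hd, hupd,
            show PySem.Set.add c (F x) = c ++ [F x] by simp [PySem.Set.add, hmem]]
        exact ih (c ++ [F x])

-- ---- stage 6: the find() loop enumerates exactly the startswith positions ----

theorem pv_goFind_spec (cs sub : List Char) (hs : sub ≠ []) :
    ∀ (fuel k : Nat) (acc : List Int), k ≤ cs.length → cs.length + 1 - k ≤ fuel →
    pvGoFind cs sub (PySem.Chars.findFrom cs sub (k : Int) none) acc fuel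
      = acc ++ (PySem.List.pyRange (k : Int) (cs.length : Int) 1).filter
          (fun p => PySem.Chars.startswith (cs.drop p.toNat) sub) := by
  intro fuel
  induction fuel with
  | zero => intro k acc hk hfuel; omega
  | succ fuel ih =>
    intro k acc hk hfuel
    by_cases hv : PySem.Chars.findFrom cs sub (k : Int) none = -1
    · simp only [pvGoFind, hv, ne_eq, not_true_eq_false, if_false]
      have hnoinf : ¬ sub <:+: cs.drop k :=
        (PySem.Chars.findFrom_natCast_eq_neg_one_iff cs sub k hk).mp hv
      have hfil : (PySem.List.pyRange (k : Int) (cs.length : Int) 1).filter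
          (fun p => PySem.Chars.startswith (cs.drop p.toNat) sub) = [] := by
        rw [List.filter_eq_nil_iff]
        intro p hp
        have hp' := (PySem.List.mem_pyRange_one).mp hp
        simp only [Bool.not_eq_true]
        rw [Bool.eq_false_iff]
        intro hsw
        have hpre := (PySem.Chars.startswith_iff _ _).mp hsw
        have hdd : cs.drop p.toNat = (cs.drop k).drop (p.toNat - k) := by
          rw [List.drop_drop]
          congr 1
          omega
        rw [hdd] at hpre
        exact hnoinf (hpre.isInfix.trans (List.drop_suffix _ _).isInfix)
      rw [hfil, List.append_nil]
    · obtain ⟨hkv, hpre, hmin⟩ := PySem.Chars.findFrom_natCast_spec cs sub k hk hv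
      set v := PySem.Chars.findFrom cs sub (k : Int) none with hvdef
      have hv0 : 0 ≤ v := le_trans (by omega) hkv
      have hm : v = ((v.toNat : Nat) : Int) := by omega
      have hmlt : v.toNat < cs.length := by
        by_contra hge
        have : cs.drop v.toNat = [] := List.drop_eq_nil_of_le (by omega)
        rw [this] at hpre
        exact hs (List.prefix_nil.mp hpre)
      simp only [pvGoFind, hv, ne_eq, not_false_eq_true, if_true]
      have hcast : v + 1 = (((v.toNat + 1 : Nat)) : Int) := by omega
      rw [hcast, ih (v.toNat + 1) (acc ++ [v]) (by omega) (by omega)]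
      have hsplit : PySem.List.pyRange (k : Int) (cs.length : Int) 1
          = PySem.List.pyRange (k : Int) ((v.toNat : Nat) : Int) 1 ++ [((v.toNat : Nat) : Int)]
            ++ PySem.List.pyRange (((v.toNat + 1 : Nat)) : Int) (cs.length : Int) 1 := by
        rw [← PySem.List.pyRange_one_succ_right (by omega)]
        have e : (((v.toNat : Nat) : Int)) + 1 = (((v.toNat + 1 : Nat)) : Int) := by omega
        rw [e, ← PySem.List.pyRange_one_append (k : Int) (((v.toNat + 1 : Nat)) : Int) _ (by omega) (by omega)]
      rw [hsplit, List.filter_append, List.filter_append]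
      have hfil1 : (PySem.List.pyRange (k : Int) ((v.toNat : Nat) : Int) 1).filter
          (fun p => PySem.Chars.startswith (cs.drop p.toNat) sub) = [] := by
        rw [List.filter_eq_nil_iff]
        intro p hp
        have hp' := (PySem.List.mem_pyRange_one).mp hp
        simp only [Bool.not_eq_true]
        rw [Bool.eq_false_iff]
        intro hsw
        have hpre' := (PySem.Chars.startswith_iff _ _).mp hsw
        exact hmin p.toNat (by omega) (by omega) hpre'
      have hfil2 : List.filter (fun p => PySem.Chars.startswith (cs.drop p.toNat) sub)
          [((v.toNat : Nat) : Int)] = [((v.toNat : Nat) : Int)] := by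
        rw [List.filter_cons, if_pos]
        · rfl
        · simp only [Int.toNat_natCast]
          exact (PySem.Chars.startswith_iff _ _).mpr hpre
      rw [hfil1, hfil2]
      simp only [List.nil_append, List.append_assoc, List.singleton_append]
      rw [← hm]

theorem pv_positions_eq (cs sub : List Char) (hs : sub ≠ []) :
    find_substring_positions cs sub
      = (PySem.List.pyRange 0 (cs.length : Int) 1).filter
          (fun p => PySem.Chars.startswith (cs.drop p.toNat) sub) := by
  unfold find_substring_positions
  rw [← PySem.Chars.findFrom_zero cs sub]
  have h0 : (0 : Int) = ((0 : Nat) : Int) := rfl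
  rw [h0, pv_goFind_spec cs sub hs (cs.length + 1) 0 [] (by omega) (by omega)]
  rfl

-- ---- stage 7: membership propagation ----

theorem pv_mem_filterfold (l acc : List (List Char)) (x : List Char)
    (h : x ∈ l.foldl (fun acc s =>
      if acc.any (fun t => PySem.Chars.isIn s t) then acc else acc ++ [s]) acc) :
    x ∈ acc ∨ x ∈ l := by
  induction l generalizing acc with
  | nil => exact Or.inl h
  | cons s t ih =>
    simp only [List.foldl_cons] at h
    rcases ih _ h with hmem | hmem
    · split at hmem
      · exact Or.inl hmem
      · rcases List.mem_append.mp hmem with h1 | h1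
        · exact Or.inl h1
        · exact Or.inr (by simp [List.mem_singleton.mp h1])
    · exact Or.inr (List.mem_cons_of_mem _ hmem)

-- ---- main: the two candidate pipelines agree ----

theorem pv_candidates_eq (cs : List Char) :
    longest_repeated_substrings cs
      = (PySem.List.sorted
          ((((PySem.List.pyRange 0 (PySem.Chars.len cs) 1).foldl
              (fun lst i => pvInsertSorted (PySem.List.slice cs (some i) none) lst) []).zip
            (PySem.List.slice ((PySem.List.pyRange 0 (PySem.Chars.len cs) 1).foldl
              (fun lst i => pvInsertSorted (PySem.List.slice cs (some i) none) lst) [])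
              (some 1) none)).foldl
            (fun (p : PySem.Set (List Char) × List (List Char)) pr =>
              if pvCommonPrefix pr.1 pr.2 ≠ [] ∧ pvCommonPrefix pr.1 pr.2 ∉ p.1 then
                (PySem.Set.add p.1 (pvCommonPrefix pr.1 pr.2), p.2 ++ [pvCommonPrefix pr.1 pr.2])
              else p)
            (PySem.Set.empty, []) |>.2.filter (fun s => PySem.Chars.len s ≤ 260))
          (fun s => PySem.Chars.len s) true).take 10 := by
  have hlen0 : PySem.Chars.len cs = ((cs.length : Nat) : Int) := by
    simp [PySem.Chars.len_eq]
  rw [longest_repeated_substrings]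
  simp only [hlen0, pv_build_eq_sorted, PySem.List.slice_from_one]
  set T := PySem.List.sorted ((PySem.List.pyRange 0 ((cs.length : Nat) : Int) 1).map
      (fun i => PySem.List.slice cs (some i) none)) (fun s => s) false with hT
  -- B side: fused pass = ordered dedup of the adjacent common prefixes
  rw [show (PySem.Set.empty, ([] : List (List Char)))
        = (([] : List (List Char)), ([] : List (List Char))) from rfl,
      pv_fused_dedup (T.zip T.tail) (fun pr => pvCommonPrefix pr.1 pr.2) []]
  have hTlen : T.length = cs.length := by
    rw [hT, PySem.List.length_sorted, List.length_map, PySem.List.length_pyRange_one]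
    omega
  set A := List.foldl (fun arr i => PySem.List.pySetD arr i
      (pvLcpLen (PySem.List.pyGetD T (i - 1) []) (PySem.List.pyGetD T i [])))
      (PySem.List.pyRepeat [0] ((cs.length : Nat) : Int)) (PySem.List.pyRange 1 ((cs.length : Nat) : Int) 1) with hA
  set g : Int → Int := fun i => pvLcpLen (PySem.List.pyGetD T (i - 1) []) (PySem.List.pyGetD T i []) with hg
  have harr0 : (PySem.List.pyRepeat ([0] : List Int) ((cs.length : Nat) : Int)).length = cs.length := by
    rw [PySem.List.pyRepeat_singleton, List.length_replicate]
    omega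
  have hlcp : ∀ i ∈ PySem.List.pyRange 1 ((cs.length : Nat) : Int) 1,
      PySem.List.pyGetD A i 0 = g i := by
    intro i hi
    have hb := (PySem.List.mem_pyRange_one).mp hi
    rw [hA]
    exact pv_foldl_pySetD_getD g cs.length _ harr0.ge i hb.1 hb.2
  have hfold1 : List.foldl
      (fun (d : PySem.Dict (List Char) (List Int)) i =>
        if PySem.List.pyGetD A i 0 > 0 then
          d.modify (PySem.List.slice (PySem.List.pyGetD T i []) none
              (some (PySem.List.pyGetD A i 0))) []
            (fun v => v ++ [i - PySem.List.pyGetD A i 0])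
        else d)
      PySem.Dict.empty (PySem.List.pyRange 1 ((cs.length : Nat) : Int) 1)
    = List.foldl
      (fun (d : PySem.Dict (List Char) (List Int)) i =>
        if g i > 0 then
          d.modify (PySem.List.slice (PySem.List.pyGetD T i []) none (some (g i))) []
            (fun v => v ++ [i - g i])
        else d)
      PySem.Dict.empty (PySem.List.pyRange 1 ((cs.length : Nat) : Int) 1) := by
    apply PySem.List.foldl_congr_mem
    intro acc i hi
    rw [hlcp i hi]
  rw [hfold1]
  rw [PySem.List.foldl_ite_eq_foldl_filter (p := fun i => g i > 0)
      (f := fun (d : PySem.Dict (List Char) (List Int)) i =>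
        d.modify (PySem.List.slice (PySem.List.pyGetD T i []) none (some (g i))) []
          (fun v => v ++ [i - g i]))]
  rw [PySem.Dict.keys_foldl_modify_key
      (key := fun i => PySem.List.slice (PySem.List.pyGetD T i []) none (some (g i)))
      (f := fun (d : PySem.Dict (List Char) (List Int)) (i : Int) => fun v => v ++ [i - g i])]
  simp only [PySem.Dict.keys_empty]
  have hLB : List.filter (fun x => decide (x ≠ []))
        ((T.zip T.tail).map (fun pr => pvCommonPrefix pr.1 pr.2))
      = List.map (fun i => PySem.List.slice (PySem.List.pyGetD T i []) none (some (g i)))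
          (List.filter (fun x => decide (g x > 0)) (PySem.List.pyRange 1 ((cs.length : Nat) : Int) 1)) := by
    rw [← pv_map_idx_eq_zip_tail T (fun a b => pvCommonPrefix a b), hTlen, List.filter_map]
    have hfc : List.filter ((fun x => decide (x ≠ []))
            ∘ (fun i => pvCommonPrefix (PySem.List.pyGetD T (i - 1) []) (PySem.List.pyGetD T i [])))
          (PySem.List.pyRange 1 ((cs.length : Nat) : Int) 1)
        = List.filter (fun x => decide (g x > 0)) (PySem.List.pyRange 1 ((cs.length : Nat) : Int) 1) := by
      apply List.filter_congr
      intro i _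
      simp only [Function.comp_apply, hg]
      rw [decide_eq_decide]
      exact pv_commonPrefix_ne_nil _ _
    rw [hfc]
    apply List.map_congr_left
    intro i hi
    simp only [hg]
    exact (pv_commonPrefix_eq_take _ _).trans
      (PySem.List.slice_to (PySem.List.pyGetD T i []) (pv_lcpLen_nonneg _ _)).symm
  rw [hLB, PySem.List.slice_to _ (show (0:Int) ≤ 10 by omega),
      show ((10:Int)).toNat = 10 from rfl]
theorem pv_candidates_ne_nil (cs : List Char) (x : List Char)
    (h : x ∈ longest_repeated_substrings cs) : x ≠ [] := by
  rw [pv_candidates_eq] at h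
  set Bld := (PySem.List.pyRange 0 (PySem.Chars.len cs) 1).foldl
      (fun lst i => pvInsertSorted (PySem.List.slice cs (some i) none) lst) [] with hB
  have h1 := List.take_subset _ _ h
  rw [PySem.List.mem_sorted] at h1
  have h2 := (List.mem_filter.mp h1).1
  rw [show (PySem.Set.empty, ([] : List (List Char)))
        = (([] : List (List Char)), ([] : List (List Char))) from rfl,
      pv_fused_dedup (Bld.zip (PySem.List.slice Bld (some 1) none))
        (fun pr => pvCommonPrefix pr.1 pr.2) []] at h2
  have h3 := (PySem.Set.mem_ofList _ x).mp h2
  simpa using (List.mem_filter.mp h3).2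

-- ===== VERDICT (by name: the statement is the Claim_ definition above) =====
theorem prepare_gantt_data_spec : Claim_equal_prepare_gantt_data := by
  unfold Claim_equal_prepare_gantt_data Spec_prepare_gantt_data
  intro text _
  simp only [prepare_gantt_data, prepare_gantt_data_alt, PySem.Chars.len_eq]
  have hfs : filter_subsequences (longest_repeated_substrings text.toList)
      = ((PySem.List.sorted
          ((((PySem.List.pyRange 0 (text.toList.length : Int) 1).foldl
              (fun lst i => pvInsertSorted (PySem.List.slice text.toList (some i) none) lst) []).zip
            (PySem.List.slice ((PySem.List.pyRange 0 (text.toList.length : Int) 1).foldl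
              (fun lst i => pvInsertSorted (PySem.List.slice text.toList (some i) none) lst) [])
              (some 1) none)).foldl
            (fun (p : PySem.Set (List Char) × List (List Char)) pr =>
              if pvCommonPrefix pr.1 pr.2 ≠ [] ∧ pvCommonPrefix pr.1 pr.2 ∉ p.1 then
                (PySem.Set.add p.1 (pvCommonPrefix pr.1 pr.2), p.2 ++ [pvCommonPrefix pr.1 pr.2])
              else p)
            (PySem.Set.empty, []) |>.2.filter (fun s => PySem.Chars.len s ≤ 260))
          (fun s => PySem.Chars.len s) true).take 10).foldl (fun acc s =>
            if acc.any (fun t => PySem.Chars.isIn s t) then acc else acc ++ [s]) [] := by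
    rw [filter_subsequences, pv_candidates_eq]
    simp only [PySem.Chars.len_eq]
  rw [hfs]
  simp only [PySem.List.foldl_append_singleton_eq_map, PySem.List.foldl_append_eq_flatMap,
    List.nil_append, Prod.mk.injEq]
  refine ⟨?_, rfl⟩
  apply List.flatMap_congr
  intro sub hsub
  rcases pv_mem_filterfold _ _ _ hsub with h0 | h0
  · cases h0
  · have hmem2 : sub ∈ longest_repeated_substrings text.toList := by
      rw [pv_candidates_eq]
      simp only [PySem.Chars.len_eq]
      exact h0
    have hne := pv_candidates_ne_nil _ _ hmem2
    rw [pv_positions_eq text.toList sub hne]
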